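-- pv_equiv track=rewrite | github.com/gitonga123/Learning_Django | ds/anagram.py | anagramSolution
-- ===== SOURCE A (Python) =====
-- def anagramSolution(s1, s2):
-- 	alist = list(s2)
--
-- 	pos1 = 0
-- 	stillOk = True
--
-- 	while pos1 < len(s1) and stillOk:
-- 		pos2 = 0
-- 		found = False
--
-- 		while pos2 < len(alist) and not found:
-- 			if s1[pos1] == alist[pos2]:
-- 				found = True
-- 			else:
-- 				pos2 = pos2 +1
-- 			pass
--
-- 		if found:
-- 			alist[pos2] = None
-- 		else:
-- 			stillOk = False
-- 			pass
--
-- 		pos1 = pos1 +1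
-- 		pass
--
-- 	return stillOk
-- ===== SOURCE B (Python) =====
-- def anagramSolution(s1, s2):
--     have = {}
--     for ch in s2:
--         have[ch] = have.get(ch, 0) + 1
--     need = {}
--     for ch in s1:
--         need[ch] = need.get(ch, 0) + 1
--     for ch, cnt in need.items():
--         if cnt > have.get(ch, 0):
--             return False
--     return True
-- ===== Notes on version B (the rewrite author's own statement) =====
-- stated objective: faster
-- what changed: Replaces A's nested scan that marks matched slots None in a copy of s2 with two one-pass frequency dictionaries compared once per distinct character of s1.
import Mathlib
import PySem

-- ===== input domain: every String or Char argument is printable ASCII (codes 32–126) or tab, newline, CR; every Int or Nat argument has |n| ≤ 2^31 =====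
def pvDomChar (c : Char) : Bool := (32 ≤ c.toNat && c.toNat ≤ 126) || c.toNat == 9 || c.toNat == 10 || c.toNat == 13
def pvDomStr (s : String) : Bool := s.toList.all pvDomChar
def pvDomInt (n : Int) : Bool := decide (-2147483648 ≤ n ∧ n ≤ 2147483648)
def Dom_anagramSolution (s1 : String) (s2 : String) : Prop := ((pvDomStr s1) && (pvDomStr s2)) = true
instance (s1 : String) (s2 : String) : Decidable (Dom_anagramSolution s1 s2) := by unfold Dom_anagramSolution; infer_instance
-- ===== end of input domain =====

-- B replaces A's quadratic nested scan (which Nones-out matched slots of a copy of s2)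
-- with two one-pass frequency dictionaries compared once per distinct char of s1 (objective: faster).

-- ===== PORT A =====
-- inner while loop: scan alist from the front; at the first slot equal to s1[pos1]
-- write None there (found); if no slot matches, signal failure (none).
def pvScanA (c : Char) : List (Option Char) → Option (List (Option Char))
  | [] => none
  | x :: xs => if x = some c then some (Option.none :: xs)
               else (pvScanA c xs).map (x :: ·)

-- outer while loop over pos1: stops with False as soon as a char of s1 is not found.
def pvLoopA (cs : List Char) (alist : List (Option Char)) : Bool :=
  match cs with
  | [] => true
  | c :: rest =>
    match pvScanA c alist with
    | some alist' => pvLoopA rest alist'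
    | none => false

def anagramSolution (s1 : String) (s2 : String) : Bool :=
  pvLoopA s1.toList (s2.toList.map some)

-- ===== PORT B =====
-- one counting pass: have[ch] = have.get(ch, 0) + 1
def pvCountB (cs : List Char) : PySem.Dict Char Int :=
  cs.foldl (fun d ch => d.insert ch (d.getD ch 0 + 1)) PySem.Dict.empty

-- final pass over need.items(): early False when cnt > have.get(ch, 0)
def pvCheckB (hv : PySem.Dict Char Int) : List (Char × Int) → Bool
  | [] => true
  | (ch, cnt) :: rest => if cnt > hv.getD ch 0 then false else pvCheckB hv rest

def anagramSolution_alt (s1 : String) (s2 : String) : Bool :=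
  pvCheckB (pvCountB s2.toList) (pvCountB s1.toList).items

-- ===== PRECONDITION & SPEC =====
def Spec_anagramSolution (s1 : String) (s2 : String) (out : Bool) : Prop := out = anagramSolution_alt s1 s2
instance (s1 : String) (s2 : String) (out : Bool) : Decidable (Spec_anagramSolution s1 s2 out) := by unfold Spec_anagramSolution; infer_instance

-- ===== CLAIM (what is proved, stated in full; the proofs are below) =====
def Claim_equal_anagramSolution : Prop := ∀ (s1 : String) (s2 : String), Dom_anagramSolution s1 s2 → Spec_anagramSolution s1 s2 (anagramSolution s1 s2)

-- ===== LEMMAS AND PROOFS =====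

-- A's inner scan fails exactly when the char is absent from the live slots
theorem pvScanA_eq_none_iff (c : Char) (l : List (Option Char)) :
    pvScanA c l = none ↔ some c ∉ l := by
  induction l with
  | nil => simp [pvScanA]
  | cons x xs ih =>
    by_cases h : x = some c <;> simp [pvScanA, h, ih, eq_comm]

theorem reduceOption_map_some (l : List Char) : (l.map some).reduceOption = l := by
  induction l with
  | nil => rfl
  | cons x xs ih => simp [List.reduceOption_cons_of_some, ih]

-- a successful scan erases exactly the first occurrence of c among the live slots
theorem pvScanA_reduceOption (c : Char) (l l' : List (Option Char))
    (h : pvScanA c l = some l') :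
    l'.reduceOption = l.reduceOption.erase c := by
  induction l generalizing l' with
  | nil => simp [pvScanA] at h
  | cons x xs ih =>
    by_cases hx : x = some c
    · subst hx
      simp [pvScanA] at h
      subst h
      simp [List.reduceOption_cons_of_some, List.reduceOption_cons_of_none,
        List.erase_cons_head]
    · simp [pvScanA, hx] at h
      obtain ⟨t, ht, rfl⟩ := h
      cases x with
      | none =>
        rw [List.reduceOption_cons_of_none, List.reduceOption_cons_of_none]
        exact ih t ht
      | some d =>
        have hd : d ≠ c := by intro h; exact hx (by simp [h])
        rw [List.reduceOption_cons_of_some, List.reduceOption_cons_of_some,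
          List.erase_cons_tail (by simp [hd]), ih t ht]

-- the multiset-subset relation steps by erasing one occurrence
theorem cons_subperm_iff_mem_erase (c : Char) (cs l : List Char) :
    List.Subperm (c :: cs) l ↔ c ∈ l ∧ List.Subperm cs (l.erase c) := by
  constructor
  · intro h
    have hc : c ∈ l := h.subset (List.mem_cons_self)
    refine ⟨hc, List.subperm_ext_iff.mpr ?_⟩
    intro x hx
    have hcount := List.subperm_ext_iff.mp h x (List.mem_cons_of_mem _ hx)
    by_cases hxc : x = c
    · subst hxc
      rw [List.count_erase_self]
      have : cs.count x + 1 ≤ l.count x := by simpa [List.count_cons] using hcount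
      omega
    · rw [List.count_erase_of_ne hxc]
      rw [List.count_cons] at hcount
      simp [Ne.symm hxc] at hcount
      exact hcount
  · rintro ⟨hc, h⟩
    exact ((List.subperm_cons c).mpr h).trans (List.perm_cons_erase hc).symm.subperm

-- A's loop decides the multiset-subset relation on the live slots
theorem pvLoopA_iff (cs : List Char) (l : List (Option Char)) :
    pvLoopA cs l = true ↔ List.Subperm cs l.reduceOption := by
  induction cs generalizing l with
  | nil => simp [pvLoopA, List.nil_subperm]
  | cons c rest ih =>
    rw [cons_subperm_iff_mem_erase]
    cases h : pvScanA c l with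
    | none =>
      have hc : some c ∉ l := (pvScanA_eq_none_iff c l).mp h
      have hnm : c ∉ l.reduceOption := fun hmem =>
        hc (List.reduceOption_mem_iff.mp hmem)
      simp [pvLoopA, h, hnm]
    | some l' =>
      have hc : some c ∈ l := by
        by_contra hn
        rw [← pvScanA_eq_none_iff c l] at hn
        simp [hn] at h
      have hcf : c ∈ l.reduceOption := List.reduceOption_mem_iff.mpr hc
      simp [pvLoopA, h, ih, pvScanA_reduceOption c l l' h, hcf]

-- B's final pass is a universal bound over the items
theorem pvCheckB_iff (hv : PySem.Dict Char Int) (ps : List (Char × Int)) :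
    pvCheckB hv ps = true ↔ ∀ p ∈ ps, p.2 ≤ hv.getD p.1 0 := by
  induction ps with
  | nil => simp [pvCheckB]
  | cons p rest ih =>
    obtain ⟨ch, cnt⟩ := p
    by_cases h : cnt > hv.getD ch 0
    · simp [pvCheckB, h]
    · simp [pvCheckB, h, ih, not_lt.mp h]

theorem pvCountB_eq_counter (cs : List Char) : pvCountB cs = PySem.Dict.counter cs :=
  PySem.Dict.foldl_insert_getD_add_one_eq_counter cs

-- B decides the same multiset-subset relation
theorem anagramSolution_alt_iff (s1 s2 : String) :
    anagramSolution_alt s1 s2 = true ↔ List.Subperm s1.toList s2.toList := by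
  rw [anagramSolution_alt, pvCountB_eq_counter, pvCountB_eq_counter, pvCheckB_iff,
    List.subperm_ext_iff]
  constructor
  · intro h x hx
    have hm := h (x, (s1.toList.count x : Int))
      (by rw [PySem.Dict.items_counter]
          exact List.mem_map.mpr ⟨x, (PySem.Set.mem_ofList _ _).mpr hx, rfl⟩)
    rw [PySem.Dict.getD_counter] at hm
    have hm2 : (s1.toList.count x : Int) ≤ (s2.toList.count x : Int) := by simpa using hm
    exact_mod_cast hm2
  · intro h p hp
    rw [PySem.Dict.items_counter] at hp
    obtain ⟨k, hk, rfl⟩ := List.mem_map.mp hp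
    rw [PySem.Dict.getD_counter]
    have h2 := h k ((PySem.Set.mem_ofList _ _).mp hk)
    simpa using (show (s1.toList.count k : Int) ≤ (s2.toList.count k : Int) by exact_mod_cast h2)

-- ===== VERDICT (by name: the statement is the Claim_ definition above) =====
theorem anagramSolution_spec : Claim_equal_anagramSolution := by
  intro s1 s2 _
  unfold Spec_anagramSolution
  rw [Bool.eq_iff_iff, anagramSolution_alt_iff, anagramSolution, pvLoopA_iff,
    reduceOption_map_some]
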